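-- pv_equiv track=rewrite | github.com/jjteunisse/aoc-2024 | joris/src/day_22.py | part_2
-- ===== SOURCE A (Python) =====
-- def evolve(secret: int) -> int:
-- 	secret = (secret ^ secret << 6) & 0xFFFFFF
-- 	secret = (secret ^ secret >> 5) & 0xFFFFFF
-- 	secret = (secret ^ secret << 11) & 0xFFFFFF
-- 	return secret
--
-- def part_2(data: str) -> int:
-- 	secrets = [int(x) for x in data.split('\n')]
--
-- 	prices_per_seq = {}
-- 	for monkey_id, secret in enumerate(secrets):
-- 		seq, price = tuple(), 0
-- 		for _ in range(2000):
-- 			new_secret = evolve(secret)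
-- 			new_price = new_secret % 10
--
-- 			diff = new_price - price
-- 			seq = ((diff,) + seq)[:4]
-- 			if seq not in prices_per_seq:
-- 				prices_per_seq[seq] = {}
-- 			if monkey_id not in prices_per_seq[seq]:
-- 				prices_per_seq[seq][monkey_id] = new_price
--
-- 			secret, price = new_secret, new_price
--
-- 	return max([sum(prices.values()) for seq, prices in prices_per_seq.items()])
-- ===== SOURCE B (Python) =====
-- def evolve(secret: int) -> int:
-- 	secret = (secret ^ secret << 6) & 0xFFFFFF
-- 	secret = (secret ^ secret >> 5) & 0xFFFFFF
-- 	secret = (secret ^ secret << 11) & 0xFFFFFF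
-- 	return secret
--
-- def part_2(data: str) -> int:
-- 	# Staged pipeline: build each monkey's full price list, derive the diff list,
-- 	# then read the 4-diff keys off the reversed diff list and keep each monkey's
-- 	# first price per key by back-to-front overwrite (no membership tests).
-- 	totals = {}
-- 	for line in data.split('\n'):
-- 		secret = int(line)
-- 		prices = []
-- 		for _ in range(2000):
-- 			secret = evolve(secret)
-- 			prices.append(secret % 10)
-- 		diffs = [q - p for p, q in zip([0] + prices, prices)]
-- 		rev_diffs = diffs[::-1]
-- 		firsts = {}
-- 		for j, price in enumerate(reversed(prices)):
-- 			firsts[tuple(rev_diffs[j:j + 4])] = price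
-- 		for key, price in firsts.items():
-- 			totals[key] = totals.get(key, 0) + price
-- 	return max(totals.values())
-- ===== Notes on version B (the rewrite author's own statement) =====
-- stated objective: alternative
-- what changed: Replaces A's fused per-step loop (incremental 4-diff tuple, membership-guarded dict-of-dicts, summed at the end) by a staged pipeline: build each monkey's full price list, derive the diff list, read the 4-diff keys off the reversed diff list, keep each monkey's first price per key by back-to-front overwrite (no membership tests), and accumulate a running global total.
import Mathlib
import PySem

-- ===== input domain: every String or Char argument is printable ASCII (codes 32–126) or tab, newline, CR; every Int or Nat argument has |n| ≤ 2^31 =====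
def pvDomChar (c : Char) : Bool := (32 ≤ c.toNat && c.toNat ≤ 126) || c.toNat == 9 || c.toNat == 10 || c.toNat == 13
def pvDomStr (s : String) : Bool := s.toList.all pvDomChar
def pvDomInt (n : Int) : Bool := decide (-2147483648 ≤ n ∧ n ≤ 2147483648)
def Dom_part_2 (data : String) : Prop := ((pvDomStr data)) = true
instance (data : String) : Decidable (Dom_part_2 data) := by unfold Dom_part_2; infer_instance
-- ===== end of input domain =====

-- B replaces A's fused loop (incremental 4-diff tuple, membership-guarded dict-of-dicts,
-- summed at the end) by a staged pipeline: full price list per monkey, diff list, keys read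
-- off the reversed diff list, first price per key kept by back-to-front overwrite, and a
-- running global total (objective: alternative; same asymptotic cost).

-- ===== PORT A =====
def pvEvolve (secret : Int) : Int :=
  let s1 := PySem.Int.band (PySem.Int.bxor secret (secret <<< 6)) 0xFFFFFF
  let s2 := PySem.Int.band (PySem.Int.bxor s1 (s1 >>> 5)) 0xFFFFFF
  PySem.Int.band (PySem.Int.bxor s2 (s2 <<< 11)) 0xFFFFFF

-- int(x); total form: Pre_ guarantees every line of the input parses
def pvParse (s : String) : Int := (PySem.Int.ofStr? s).getD 0

-- body of A's inner 'for _ in range(2000)' loop; state (prices_per_seq, seq, price, secret)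
def pvStepA (mid : Int)
    (st : PySem.Dict (List Int) (PySem.Dict Int Int) × List Int × Int × Int) (_i : Int) :
    PySem.Dict (List Int) (PySem.Dict Int Int) × List Int × Int × Int :=
  let pps := st.1
  let seq := st.2.1
  let price := st.2.2.1
  let secret := st.2.2.2
  let newSecret := pvEvolve secret
  let newPrice := PySem.Int.mod newSecret 10
  let diff := newPrice - price
  let seq' := PySem.List.slice (diff :: seq) none (some 4)
  let pps1 := if pps.contains seq' then pps else pps.insert seq' PySem.Dict.empty
  let inner := pps1.getD seq' PySem.Dict.empty
  let pps2 := if inner.contains mid then pps1 else pps1.insert seq' (inner.insert mid newPrice)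
  (pps2, seq', newPrice, newSecret)

-- A's outer loop carries the whole inner-state tuple; only the dict survives a monkey,
-- seq/price/secret are re-initialised to (), 0 and the monkey's secret, exactly as the Python
def part_2 (data : String) : Int :=
  let secrets := ((PySem.Str.split? data "\n").getD []).map pvParse
  let fin := (PySem.List.enumerate secrets).foldl
      (fun st p => (PySem.List.pyRange 0 2000 1).foldl (pvStepA p.1)
        (st.1, ([] : List Int), 0, p.2))
      (PySem.Dict.empty, ([] : List Int), 0, 0)
  let sums := fin.1.items.map (fun p => (p.2.values).sum)
  (PySem.List.max? sums (fun x => x)).getD 0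


-- ===== PORT B =====
-- body of B's outer 'for line in data.split('\n')' loop: build the monkey's price list,
-- its diff list, read keys off the reversed diff list, keep first prices by reverse
-- overwrite, then merge into the running totals
def pvMonkeyB (totals : PySem.Dict (List Int) Int) (line : String) :
    PySem.Dict (List Int) Int :=
  let secret := pvParse line
  let pr := (PySem.List.pyRange 0 2000 1).foldl
      (fun st _ => (st.1 ++ [PySem.Int.mod (pvEvolve st.2) 10], pvEvolve st.2))
      (([] : List Int), secret)
  let prices := pr.1
  let diffs := (List.zip (0 :: prices) prices).map (fun p => p.2 - p.1)
  let revDiffs := (PySem.List.slice? diffs none none (-1)).getD []   -- diffs[::-1]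
  let firsts := (PySem.List.enumerate prices.reverse).foldl
      (fun d p => d.insert (PySem.List.slice revDiffs (some p.1) (some (p.1 + 4))) p.2)
      (PySem.Dict.empty : PySem.Dict (List Int) Int)
  firsts.items.foldl (fun t kv => t.insert kv.1 (t.getD kv.1 0 + kv.2)) totals

def part_2_alt (data : String) : Int :=
  let totals := ((PySem.Str.split? data "\n").getD []).foldl pvMonkeyB PySem.Dict.empty
  (PySem.List.max? totals.values (fun x => x)).getD 0


-- ===== PRECONDITION & SPEC =====
-- Pre_ excludes exactly the inputs on which Python A raises ValueError: some line of the
-- input that int() cannot parse.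
def Pre_part_2 (data : String) : Prop :=
  ∀ line ∈ (PySem.Str.split? data "\n").getD [], (PySem.Int.ofStr? line).isSome = true
instance (data : String) : Decidable (Pre_part_2 data) := by unfold Pre_part_2; infer_instance

def pvWitness_part_2 : String := "123\n10"

def Spec_part_2 (data : String) (out : Int) : Prop := out = part_2_alt data
instance (data : String) (out : Int) : Decidable (Spec_part_2 data out) := by unfold Spec_part_2; infer_instance

-- ===== CLAIM (what is proved, stated in full; the proofs are below) =====
def Claim_equal_part_2 : Prop := ∀ (data : String), Dom_part_2 data → Pre_part_2 data → Spec_part_2 data (part_2 data)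

-- ===== LEMMAS AND PROOFS =====

def pvAUpd (mid : Int) (pps : PySem.Dict (List Int) (PySem.Dict Int Int))
    (kv : List Int × Int) : PySem.Dict (List Int) (PySem.Dict Int Int) :=
  let pps1 := if pps.contains kv.1 then pps else pps.insert kv.1 PySem.Dict.empty
  let inner := pps1.getD kv.1 PySem.Dict.empty
  if inner.contains mid then pps1 else pps1.insert kv.1 (inner.insert mid kv.2)
def pvFirst? (E : List (List Int × Int)) (k : List Int) : Option Int :=
  (E.find? (fun kv => kv.1 == k)).map Prod.snd
def pvHasKey (E : List (List Int × Int)) (k : List Int) : Bool := E.any (fun kv => kv.1 == k)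

lemma pvAUpd_getD (mid : Int) (pps : PySem.Dict (List Int) (PySem.Dict Int Int))
    (kv : List Int × Int) (k : List Int) :
    (pvAUpd mid pps kv).getD k PySem.Dict.empty
      = if k = kv.1 then
          (if (pps.getD kv.1 PySem.Dict.empty).contains mid then pps.getD kv.1 PySem.Dict.empty
           else (pps.getD kv.1 PySem.Dict.empty).insert mid kv.2)
        else pps.getD k PySem.Dict.empty := by
  simp only [pvAUpd]
  by_cases hc : pps.contains kv.1 = true
  · simp only [hc, if_true]
    by_cases hm : (pps.getD kv.1 PySem.Dict.empty).contains mid = true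
    · simp only [hm, if_true]
      by_cases hk : k = kv.1
      · subst hk; simp
      · simp [hk]
    · simp only [hm, Bool.false_eq_true, if_false, PySem.Dict.getD_insert]
  · have hged : pps.getD kv.1 PySem.Dict.empty = PySem.Dict.empty :=
      PySem.Dict.getD_of_not_contains pps PySem.Dict.empty (by simpa using hc)
    have h1 : ((pps.insert kv.1 (PySem.Dict.empty : PySem.Dict Int Int)).getD kv.1
        PySem.Dict.empty) = PySem.Dict.empty := by
      rw [PySem.Dict.getD_insert, if_pos rfl]
    simp only [hc, Bool.false_eq_true, if_false, h1, hged]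
    rw [show (PySem.Dict.empty : PySem.Dict Int Int).contains mid = false from rfl]
    simp only [Bool.false_eq_true, if_false, PySem.Dict.insert_insert_self,
      PySem.Dict.getD_insert]

lemma pvAUpd_contains (mid : Int) (pps : PySem.Dict (List Int) (PySem.Dict Int Int))
    (kv : List Int × Int) (k : List Int) :
    (pvAUpd mid pps kv).contains k = (pps.contains k || (kv.1 == k)) := by
  simp only [pvAUpd]
  by_cases hc : pps.contains kv.1 = true
  · simp only [hc, if_true]
    by_cases hm : (pps.getD kv.1 PySem.Dict.empty).contains mid = true
    · simp only [hm, if_true]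
      by_cases hk : kv.1 = k
      · subst hk; simp [hc]
      · have h1 : (kv.1 == k) = false := by simpa using hk
        simp [h1]
    · simp only [hm, Bool.false_eq_true, if_false, PySem.Dict.contains_insert]
      have hbc : (k == kv.1) = (kv.1 == k) := by
        by_cases h : k = kv.1
        · simp [h]
        · simp [h, (Ne.symm h : kv.1 ≠ k)]
      rw [hbc]
      cases (kv.1 == k) <;> simp
  · simp only [hc, Bool.false_eq_true, if_false]
    have : ((pps.insert kv.1 (PySem.Dict.empty : PySem.Dict Int Int)).getD kv.1
        PySem.Dict.empty).contains mid = false := by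
      rw [PySem.Dict.getD_insert, if_pos rfl]; rfl
    simp only [this, Bool.false_eq_true, if_false, PySem.Dict.contains_insert,
      PySem.Dict.contains_insert]
    have hbc : (k == kv.1) = (kv.1 == k) := by
      by_cases h : k = kv.1
      · simp [h]
      · simp [h, (Ne.symm h : kv.1 ≠ k)]
    rw [hbc]
    cases (kv.1 == k) <;> simp

lemma pvAUpd_fold_getD (E : List (List Int × Int)) (mid : Int)
    (pps : PySem.Dict (List Int) (PySem.Dict Int Int)) (k : List Int) :
    (E.foldl (pvAUpd mid) pps).getD k PySem.Dict.empty
      = if (pps.getD k PySem.Dict.empty).contains mid then pps.getD k PySem.Dict.empty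
        else match pvFirst? E k with
          | some v => (pps.getD k PySem.Dict.empty).insert mid v
          | none => pps.getD k PySem.Dict.empty := by
  induction E generalizing pps with
  | nil =>
    simp only [List.foldl_nil, pvFirst?, List.find?_nil, Option.map_none]
    split <;> rfl
  | cons kv t ih =>
    simp only [List.foldl_cons]
    rw [ih]
    by_cases hk : k = kv.1
    · rw [hk]
      have hfind : pvFirst? (kv :: t) kv.1 = some kv.2 := by
        unfold pvFirst?
        rw [List.find?_cons_of_pos (by simp)]
        rfl
      rw [hfind]
      have hgA := pvAUpd_getD mid pps kv kv.1
      rw [if_pos rfl] at hgA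
      by_cases hm : (pps.getD kv.1 PySem.Dict.empty).contains mid = true
      · rw [if_pos hm] at hgA
        rw [hgA, if_pos hm, if_pos hm]
      · rw [if_neg hm] at hgA
        rw [hgA, if_neg hm, if_pos (PySem.Dict.contains_insert_self _ _ _)]
    · have hfind : pvFirst? (kv :: t) k = pvFirst? t k := by
        unfold pvFirst?
        rw [List.find?_cons_of_neg (by
          show ¬(kv.1 == k) = true
          simp only [beq_iff_eq]
          exact fun h => hk h.symm)]
      have hgA := pvAUpd_getD mid pps kv k
      rw [if_neg hk] at hgA
      rw [hgA, hfind]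

lemma pvAUpd_fold_contains (E : List (List Int × Int)) (mid : Int)
    (pps : PySem.Dict (List Int) (PySem.Dict Int Int)) (k : List Int) :
    (E.foldl (pvAUpd mid) pps).contains k = (pps.contains k || pvHasKey E k) := by
  induction E generalizing pps with
  | nil => simp [pvHasKey]
  | cons kv t ih =>
    simp only [List.foldl_cons]
    rw [ih, pvAUpd_contains]
    have h1 : pvHasKey (kv :: t) k = (kv.1 == k || pvHasKey t k) := by simp [pvHasKey]
    rw [h1, Bool.or_assoc]

lemma pvAUpd_fold_nodup (E : List (List Int × Int)) (mid : Int)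
    (pps : PySem.Dict (List Int) (PySem.Dict Int Int)) (h : pps.keys.Nodup) :
    (E.foldl (pvAUpd mid) pps).keys.Nodup := by
  induction E generalizing pps with
  | nil => exact h
  | cons kv t ih =>
    refine ih _ ?_
    simp only [pvAUpd]
    split <;> split <;>
      first
        | exact h
        | exact PySem.Dict.nodup_keys_insert _ _ _ h
        | exact PySem.Dict.nodup_keys_insert _ _ _ (PySem.Dict.nodup_keys_insert _ _ _ h)

lemma pvFirst?_cons_self (kv : List Int × Int) (t : List (List Int × Int)) :
    pvFirst? (kv :: t) kv.1 = some kv.2 := by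
  unfold pvFirst?
  rw [List.find?_cons_of_pos (by simp)]
  rfl

lemma pvFirst?_cons_ne (kv : List Int × Int) (t : List (List Int × Int)) (k : List Int)
    (hk : ¬ k = kv.1) : pvFirst? (kv :: t) k = pvFirst? t k := by
  unfold pvFirst?
  rw [List.find?_cons_of_neg (by
    show ¬(kv.1 == k) = true
    simp only [beq_iff_eq]
    exact fun h => hk h.symm)]

lemma pvHasKey_cons (kv : List Int × Int) (t : List (List Int × Int)) (k : List Int) :
    pvHasKey (kv :: t) k = ((kv.1 == k) || pvHasKey t k) := by simp [pvHasKey]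

lemma pvRevFold_get? (E : List (List Int × Int)) (d0 : PySem.Dict (List Int) Int) (k : List Int) :
    ((E.reverse.foldl (fun d kv => d.insert kv.1 kv.2) d0).get? k)
      = ((pvFirst? E k).or (d0.get? k)) := by
  induction E generalizing d0 with
  | nil => simp [pvFirst?]
  | cons kv t ih =>
    rw [List.reverse_cons, List.foldl_append]
    simp only [List.foldl_cons, List.foldl_nil]
    by_cases hk : k = kv.1
    · rw [hk, PySem.Dict.get?_insert_self, pvFirst?_cons_self]
      rfl
    · rw [PySem.Dict.get?_insert_of_ne _ _ hk, ih, pvFirst?_cons_ne _ _ _ hk]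

lemma pvRevFold_contains (E : List (List Int × Int)) (d0 : PySem.Dict (List Int) Int)
    (k : List Int) :
    ((E.reverse.foldl (fun d kv => d.insert kv.1 kv.2) d0).contains k)
      = (pvHasKey E k || d0.contains k) := by
  induction E generalizing d0 with
  | nil => simp [pvHasKey]
  | cons kv t ih =>
    rw [List.reverse_cons, List.foldl_append]
    simp only [List.foldl_cons, List.foldl_nil]
    rw [PySem.Dict.contains_insert, ih, pvHasKey_cons]
    have hbc : (k == kv.1) = (kv.1 == k) := by
      by_cases h : k = kv.1
      · simp [h]
      · simp [h, (Ne.symm h : kv.1 ≠ k)]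
    rw [hbc]
    cases (kv.1 == k) <;> simp

lemma pvRevFold_nodup (E : List (List Int × Int)) (d0 : PySem.Dict (List Int) Int)
    (h : d0.keys.Nodup) :
    ((E.reverse.foldl (fun d kv => d.insert kv.1 kv.2) d0).keys).Nodup := by
  induction E.reverse generalizing d0 with
  | nil => exact h
  | cons kv t ih => exact ih _ (PySem.Dict.nodup_keys_insert _ _ _ h)

lemma pvMerge_getD (L : List (List Int × Int)) (t0 : PySem.Dict (List Int) Int)
    (hnd : (L.map Prod.fst).Nodup) (k : List Int) :
    (L.foldl (fun t kv => t.insert kv.1 (t.getD kv.1 0 + kv.2)) t0).getD k 0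
      = t0.getD k 0 + ((pvFirst? L k).getD 0) := by
  induction L generalizing t0 with
  | nil => simp [pvFirst?]
  | cons kv t ih =>
    simp only [List.foldl_cons]
    simp only [List.map_cons, List.nodup_cons] at hnd
    rw [ih _ hnd.2]
    by_cases hk : k = kv.1
    · have hf : pvFirst? t k = none := by
        unfold pvFirst?
        rw [List.find?_eq_none.mpr]
        · rfl
        · intro p hp
          simp only [beq_iff_eq, hk]
          intro hpk
          exact hnd.1 (hpk ▸ (List.mem_map_of_mem hp))
      rw [hf, hk, PySem.Dict.getD_insert, if_pos rfl, pvFirst?_cons_self]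
      simp
    · rw [PySem.Dict.getD_insert, if_neg hk, pvFirst?_cons_ne _ _ _ hk]

lemma pvMerge_contains (L : List (List Int × Int)) (t0 : PySem.Dict (List Int) Int)
    (k : List Int) :
    (L.foldl (fun t kv => t.insert kv.1 (t.getD kv.1 0 + kv.2)) t0).contains k
      = (t0.contains k || pvHasKey L k) := by
  induction L generalizing t0 with
  | nil => simp [pvHasKey]
  | cons kv t ih =>
    simp only [List.foldl_cons]
    rw [ih, PySem.Dict.contains_insert, pvHasKey_cons]
    have hbc : (k == kv.1) = (kv.1 == k) := by
      by_cases h : k = kv.1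
      · simp [h]
      · simp [h, (Ne.symm h : kv.1 ≠ k)]
    rw [hbc]
    cases (kv.1 == k) <;> simp

lemma pvMerge_nodup (L : List (List Int × Int)) (t0 : PySem.Dict (List Int) Int)
    (h : t0.keys.Nodup) :
    ((L.foldl (fun t kv => t.insert kv.1 (t.getD kv.1 0 + kv.2)) t0).keys).Nodup := by
  induction L generalizing t0 with
  | nil => exact h
  | cons kv t ih => exact ih _ (PySem.Dict.nodup_keys_insert _ _ _ h)

-- the price stream of one monkey
def pvPrices (s : Int) : Nat → List Int
  | 0 => []
  | n+1 => PySem.Int.mod (pvEvolve s) 10 :: pvPrices (pvEvolve s) n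

-- the (key, price) pairs one monkey generates, in A's loop order
def pvEntries (seq : List Int) (price s : Int) : Nat → List (List Int × Int)
  | 0 => []
  | n+1 =>
    let np := PySem.Int.mod (pvEvolve s) 10
    let key := PySem.List.slice ((np - price) :: seq) none (some 4)
    (key, np) :: pvEntries key np (pvEvolve s) n

def pvDiffs (p : Int) (l : List Int) : List Int := (List.zip (p :: l) l).map (fun q => q.2 - q.1)

lemma pvSlice4 (l : List Int) : PySem.List.slice l none (some 4) = l.take 4 := by
  have := PySem.List.slice_to l (b := 4) (by norm_num)
  simpa using this

lemma pvPrices_length (s : Int) (n : Nat) : (pvPrices s n).length = n := by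
  induction n generalizing s with
  | zero => rfl
  | succ n ih => simp [pvPrices, ih]

lemma pvPricesB (l : List Int) (acc : List Int) (s : Int) :
    (l.foldl (fun st (_ : Int) => (st.1 ++ [PySem.Int.mod (pvEvolve st.2) 10], pvEvolve st.2))
      (acc, s)).1 = acc ++ pvPrices s l.length := by
  induction l generalizing acc s with
  | nil => simp [pvPrices]
  | cons x t ih =>
    simp only [List.foldl_cons, List.length_cons, pvPrices]
    rw [ih]
    simp

lemma pvDiffs_cons (p a : Int) (l : List Int) :
    pvDiffs p (a :: l) = (a - p) :: pvDiffs a l := by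
  simp [pvDiffs, List.zip]

lemma pvTakeAppendTake (X Y : List Int) (k : Nat) : (X ++ Y.take k).take k = (X ++ Y).take k := by
  rw [List.take_append, List.take_append, List.take_take]
  have : min (k - X.length) k = k - X.length := by omega
  rw [this]

lemma pvEntries_eq (seq : List Int) (price s : Int) (n : Nat) :
    pvEntries seq price s n
      = (List.range n).map (fun i =>
          (((((pvDiffs price (pvPrices s n)).take (i+1)).reverse) ++ seq).take 4,
            (pvPrices s n).getD i 0)) := by
  induction n generalizing seq price s with
  | zero => rfl
  | succ n ih =>
    have hP : pvPrices s (n+1) = PySem.Int.mod (pvEvolve s) 10 :: pvPrices (pvEvolve s) n := rfl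
    have hD : pvDiffs price (pvPrices s (n+1))
        = (PySem.Int.mod (pvEvolve s) 10 - price)
            :: pvDiffs (PySem.Int.mod (pvEvolve s) 10) (pvPrices (pvEvolve s) n) := by
      rw [hP, pvDiffs_cons]
    have htail : ∀ i : Nat,
        ((((pvDiffs (PySem.Int.mod (pvEvolve s) 10) (pvPrices (pvEvolve s) n)).take (i+1)).reverse
            ++ ((PySem.Int.mod (pvEvolve s) 10 - price) :: seq).take 4)).take 4
          = (((pvDiffs price (pvPrices s (n+1))).take (i+1+1)).reverse ++ seq).take 4 := by
      intro i
      rw [pvTakeAppendTake, hD, List.take_succ_cons, List.reverse_cons, List.append_assoc,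
        List.singleton_append]
    have hval : ∀ i : Nat, (pvPrices (pvEvolve s) n).getD i 0 = (pvPrices s (n+1)).getD (i+1) 0 := by
      intro i
      rw [hP, List.getD_cons_succ]
    simp only [pvEntries, pvSlice4]
    rw [ih]
    rw [List.range_succ_eq_map, List.map_cons, List.map_map]
    congr 1
    apply List.map_congr_left
    intro i _
    apply Prod.ext
    · simpa using htail i
    · simpa using hval i

lemma pvEntries_length (seq : List Int) (price s : Int) (n : Nat) :
    (pvEntries seq price s n).length = n := by
  rw [pvEntries_eq]
  simp

lemma pvEntries_getElem (s : Int) (n j : Nat)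
    (h : j < (pvEntries [] 0 s n).length) :
    (pvEntries [] 0 s n)[j]'h
      = ((((pvDiffs 0 (pvPrices s n)).take (j+1)).reverse).take 4,
          (pvPrices s n).getD j 0) := by
  have he := pvEntries_eq [] 0 s n
  rw [List.getElem_of_eq he, List.getElem_map, List.getElem_range]
  simp

lemma pvPairsB (s : Int) (n : Nat) :
    (PySem.List.enumerate (pvPrices s n).reverse).map
        (fun p => (PySem.List.slice (pvDiffs 0 (pvPrices s n)).reverse
            (some p.1) (some (p.1 + 4)), p.2))
      = (pvEntries [] 0 s n).reverse := by
  have hPlen : (pvPrices s n).length = n := pvPrices_length s n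
  have hDlen : (pvDiffs 0 (pvPrices s n)).length = n := by
    simp [pvDiffs, hPlen]
  have hElen : (pvEntries [] 0 s n).length = n := pvEntries_length [] 0 s n
  apply List.ext_getElem
  · simp [PySem.List.length_enumerate, hPlen, hElen]
  · intro j h1 h2
    have hj : j < n := by
      simpa [PySem.List.length_enumerate, hPlen] using h1
    rw [List.getElem_map, PySem.List.getElem_enumerate, List.getElem_reverse,
      List.getElem_reverse]
    rw [pvEntries_getElem s n _]
    dsimp only
    apply Prod.ext
    · dsimp only
      have h0 : ((0 : Int) + j) = ((j : Nat) : Int) := by ring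
      rw [h0]
      rw [show ((j : Nat) : Int) + 4 = (((j + 4 : Nat)) : Int) by push_cast; ring]
      rw [PySem.List.slice_natCast, List.drop_reverse]
      have h5 : (j + 4) - j = 4 := by omega
      have h6 : (pvEntries [] 0 s n).length - 1 - j + 1 = n - j := by omega
      have h7 : (pvDiffs 0 (pvPrices s n)).length - j = n - j := by omega
      rw [h5, h6, h7]
    · dsimp only
      rw [List.getD_eq_getElem _ _ (by omega : (pvEntries [] 0 s n).length - 1 - j < (pvPrices s n).length)]
      congr 1
      omega


-- the invariant carried across monkeys
def pvInv (pps : PySem.Dict (List Int) (PySem.Dict Int Int))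
    (totals : PySem.Dict (List Int) Int) (idx : Int) : Prop :=
  pps.keys.Nodup ∧ totals.keys.Nodup ∧
  (∀ k, totals.contains k = pps.contains k) ∧
  (∀ k, totals.getD k 0 = ((pps.getD k PySem.Dict.empty).values).sum) ∧
  (∀ k k', ((pps.getD k PySem.Dict.empty).contains k') = true → k' < idx)

lemma pvInnerA (l : List Int) (mid : Int) (pps : PySem.Dict (List Int) (PySem.Dict Int Int))
    (seq : List Int) (price s : Int) :
    (l.foldl (pvStepA mid) (pps, seq, price, s)).1
      = (pvEntries seq price s l.length).foldl (pvAUpd mid) pps := by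
  induction l generalizing pps seq price s with
  | nil => rfl
  | cons x t ih =>
    simp only [List.foldl_cons, List.length_cons, pvEntries, pvStepA, pvAUpd]
    exact ih _ _ _ _

-- B's monkey body is: build the entries, reverse-insert them, merge the items
lemma pvMonkeyB_eq (totals : PySem.Dict (List Int) Int) (line : String) :
    pvMonkeyB totals line
      = (((pvEntries [] 0 (pvParse line) 2000).reverse.foldl
            (fun d kv => d.insert kv.1 kv.2)
            (PySem.Dict.empty : PySem.Dict (List Int) Int)).items).foldl
          (fun t kv => t.insert kv.1 (t.getD kv.1 0 + kv.2)) totals := by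
  unfold pvMonkeyB
  dsimp only
  have hr : (PySem.List.pyRange 0 2000 1).length = 2000 := by
    rw [PySem.List.length_pyRange_one]; rfl
  have hp := pvPricesB (PySem.List.pyRange 0 2000 1) [] (pvParse line)
  rw [hr] at hp
  rw [hp, List.nil_append]
  rw [PySem.List.slice?_none_none_neg_one]
  have hz : ((List.zip ((0:Int) :: pvPrices (pvParse line) 2000) (pvPrices (pvParse line) 2000)).map
      (fun p => p.2 - p.1)) = pvDiffs 0 (pvPrices (pvParse line) 2000) := rfl
  rw [hz]
  rw [show ∀ (x : List Int), (some x).getD ([] : List Int) = x from fun _ => rfl]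
  rw [← List.foldl_map (f := fun p : Int × Int =>
      ((PySem.List.slice (pvDiffs 0 (pvPrices (pvParse line) 2000)).reverse
        (some p.1) (some (p.1 + 4))), p.2))
      (g := fun (d : PySem.Dict (List Int) Int) kv => d.insert kv.1 kv.2)]
  rw [pvPairsB]

lemma pvMonkey_inv (pps : PySem.Dict (List Int) (PySem.Dict Int Int))
    (totals : PySem.Dict (List Int) Int) (idx : Int) (line : String)
    (h : pvInv pps totals idx) :
    pvInv ((pvEntries [] 0 (pvParse line) 2000).foldl (pvAUpd idx) pps)
      (pvMonkeyB totals line) (idx + 1) := by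
  obtain ⟨hnd1, hnd2, hc, hg, hb⟩ := h
  have hfresh : ∀ k, (pps.getD k PySem.Dict.empty).contains idx = false := by
    intro k
    by_cases hx : (pps.getD k PySem.Dict.empty).contains idx = true
    · exact absurd (hb k idx hx) (lt_irrefl idx)
    · simpa using hx
  rw [pvMonkeyB_eq]
  set E := pvEntries [] 0 (pvParse line) 2000 with hE
  set F := E.reverse.foldl (fun d kv => d.insert kv.1 kv.2)
      (PySem.Dict.empty : PySem.Dict (List Int) Int) with hF
  have hndF : (F.items.map Prod.fst).Nodup := by
    have h0 := pvRevFold_nodup E PySem.Dict.empty PySem.Dict.nodup_keys_empty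
    exact h0
  have hFget : ∀ k, pvFirst? F.items k = pvFirst? E k := by
    intro k
    have h1 : pvFirst? F.items k = F.get? k := rfl
    rw [h1, pvRevFold_get?]
    simp [PySem.Dict.get?_empty]
  have hFhas : ∀ k, pvHasKey F.items k = pvHasKey E k := by
    intro k
    have h1 : pvHasKey F.items k = F.contains k := rfl
    rw [h1, pvRevFold_contains]
    simp [PySem.Dict.contains_empty]
  refine ⟨pvAUpd_fold_nodup E idx pps hnd1, pvMerge_nodup _ _ hnd2, ?_, ?_, ?_⟩
  · intro k
    rw [pvMerge_contains, pvAUpd_fold_contains, hc, hFhas]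
  · intro k
    rw [pvMerge_getD _ _ hndF k, hg, hFget]
    rw [pvAUpd_fold_getD, hfresh]
    simp only [Bool.false_eq_true, if_false]
    cases hfk : pvFirst? E k with
    | none => simp
    | some v =>
      have hiv : ((pps.getD k PySem.Dict.empty).insert idx v).values
          = (pps.getD k PySem.Dict.empty).values ++ [v] := by
        rw [PySem.Dict.values, PySem.Dict.items_insert_of_not_contains _ _ (hfresh k)]
        simp [PySem.Dict.values]
      rw [hiv]
      simp
  · intro k k' hcon
    rw [pvAUpd_fold_getD, hfresh] at hcon
    simp only [Bool.false_eq_true, if_false] at hcon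
    cases hfk : pvFirst? E k with
    | none =>
      rw [hfk] at hcon
      exact lt_trans (hb k k' hcon) (by omega)
    | some v =>
      rw [hfk] at hcon
      rw [PySem.Dict.contains_insert] at hcon
      rcases Bool.or_eq_true_iff.mp hcon with h1 | h1
      · have : k' = idx := by simpa using h1
        omega
      · exact lt_trans (hb k k' h1) (by omega)

lemma pvOuterInv (lines : List String) (idx : Int)
    (stA : PySem.Dict (List Int) (PySem.Dict Int Int) × List Int × Int × Int)
    (totals : PySem.Dict (List Int) Int)
    (h : pvInv stA.1 totals idx) :
    pvInv ((PySem.List.enumerate (lines.map pvParse) idx).foldl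
        (fun st p => (PySem.List.pyRange 0 2000 1).foldl (pvStepA p.1)
          (st.1, ([] : List Int), 0, p.2)) stA).1
      (lines.foldl pvMonkeyB totals) (idx + lines.length) := by
  induction lines generalizing idx stA totals with
  | nil => simpa using h
  | cons x t ih =>
    have henum : PySem.List.enumerate ((x :: t).map pvParse) idx
        = (idx, pvParse x) :: PySem.List.enumerate (t.map pvParse) (idx + 1) := rfl
    rw [henum]
    simp only [List.foldl_cons]
    have hr : (PySem.List.pyRange 0 2000 1).length = 2000 := by
      rw [PySem.List.length_pyRange_one]; rfl
    have hinner := pvInnerA (PySem.List.pyRange 0 2000 1) idx stA.1 [] 0 (pvParse x)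
    rw [hr] at hinner
    have hm := pvMonkey_inv stA.1 totals idx x h
    rw [← hinner] at hm
    have hrec := ih (idx + 1)
      ((PySem.List.pyRange 0 2000 1).foldl (pvStepA idx) (stA.1, ([] : List Int), 0, pvParse x))
      (pvMonkeyB totals x) hm
    have hidx : idx + ((x :: t).length : Int) = (idx + 1) + (t.length : Int) := by
      simp only [List.length_cons]
      push_cast [Nat.cast_add]
      ring
    rw [hidx]
    exact hrec

lemma pvMaxEq (l1 l2 : List Int) (h12 : ∀ v ∈ l1, v ∈ l2) (h21 : ∀ v ∈ l2, v ∈ l1) :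
    (PySem.List.max? l1 (fun x => x)).getD 0 = (PySem.List.max? l2 (fun x => x)).getD 0 := by
  cases l1 with
  | nil =>
    have h2 : l2 = [] := List.eq_nil_iff_forall_not_mem.mpr (fun v hv => by simpa using h21 v hv)
    rw [h2]
  | cons x t =>
    cases l2 with
    | nil => exact absurd (h12 x (List.mem_cons_self)) (by simp)
    | cons y u =>
      obtain ⟨m1, hm1⟩ : ∃ m1, PySem.List.max? (x :: t) (fun v => v) = some m1 :=
        ⟨_, PySem.List.max?_id_cons x t⟩
      obtain ⟨m2, hm2⟩ : ∃ m2, PySem.List.max? (y :: u) (fun v => v) = some m2 :=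
        ⟨_, PySem.List.max?_id_cons y u⟩
      rw [hm1, hm2]
      simp only [Option.getD_some]
      exact le_antisymm
        (PySem.List.max?_isMax hm2 m1 (h12 m1 (PySem.List.max?_mem hm1)))
        (PySem.List.max?_isMax hm1 m2 (h21 m2 (PySem.List.max?_mem hm2)))

-- ===== VERDICT (by name: the statement is the Claim_ definition above) =====
theorem part_2_spec : Claim_equal_part_2 := by
  unfold Claim_equal_part_2
  intro data _ _
  unfold Spec_part_2
  unfold part_2 part_2_alt
  dsimp only
  set lines := (PySem.Str.split? data "\n").getD [] with hlines
  have hInv0 : pvInv PySem.Dict.empty PySem.Dict.empty 0 := by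
    refine ⟨PySem.Dict.nodup_keys_empty, PySem.Dict.nodup_keys_empty, ?_, ?_, ?_⟩
    · intro k; rfl
    · intro k; rfl
    · intro k k' hx
      simp [PySem.Dict.getD_empty, PySem.Dict.contains_empty] at hx
  have hO := pvOuterInv lines 0
    ((PySem.Dict.empty : PySem.Dict (List Int) (PySem.Dict Int Int)), ([] : List Int), 0, 0)
    PySem.Dict.empty hInv0
  obtain ⟨hnd1, hnd2, hc, hg, -⟩ := hO
  set ppsF := ((PySem.List.enumerate (lines.map pvParse) 0).foldl
      (fun st p => (PySem.List.pyRange 0 2000 1).foldl (pvStepA p.1)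
        (st.1, ([] : List Int), 0, p.2))
      ((PySem.Dict.empty : PySem.Dict (List Int) (PySem.Dict Int Int)), ([] : List Int), 0, 0)).1
    with hppsF
  set totalsF := lines.foldl pvMonkeyB (PySem.Dict.empty : PySem.Dict (List Int) Int) with htotalsF
  apply pvMaxEq
  · intro v hv
    obtain ⟨p, hp, hpv⟩ := List.mem_map.mp hv
    have hk : ppsF.getD p.1 PySem.Dict.empty = p.2 :=
      PySem.Dict.getD_of_mem_items ppsF (by simpa using hp) hnd1 PySem.Dict.empty
    have hv1 : totalsF.getD p.1 0 = v := by rw [hg, hk, hpv]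
    have hcont : ppsF.contains p.1 = true := by
      rw [PySem.Dict.contains_iff_mem_keys]
      exact PySem.Dict.mem_keys_of_mem_items ppsF hp
    have hcT : totalsF.contains p.1 = true := by rw [hc]; exact hcont
    obtain ⟨w, hw⟩ : ∃ w, totalsF.get? p.1 = some w := by
      have h1 := PySem.Dict.contains_eq_isSome_get? (d := totalsF) (k := p.1)
      rw [hcT] at h1
      exact Option.isSome_iff_exists.mp h1.symm
    have hwv : w = v := by
      have h1 := PySem.Dict.getD_eq_get?_getD (d := totalsF) (k := p.1) (d0 := 0)
      rw [hw] at h1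
      simp only [Option.getD_some] at h1
      rw [← hv1, h1]
    have hmem : (p.1, w) ∈ totalsF.items := PySem.Dict.mem_items_of_get?_eq_some totalsF hw
    have : w ∈ totalsF.values := by
      have := List.mem_map_of_mem (f := fun q : List Int × Int => q.2) hmem
      simpa [PySem.Dict.values] using this
    rwa [hwv] at this
  · intro v hv
    rw [PySem.Dict.values_eq_map_keys totalsF hnd2 0] at hv
    obtain ⟨k, hkmem, hkv⟩ := List.mem_map.mp hv
    have hcT : totalsF.contains k = true := by
      rw [PySem.Dict.contains_iff_mem_keys]; exact hkmem
    have hcont : ppsF.contains k = true := by rw [← hc]; exact hcT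
    have hkeys : k ∈ ppsF.keys := (PySem.Dict.contains_iff_mem_keys _ _).mp hcont
    obtain ⟨p, hp, hpk⟩ : ∃ p ∈ ppsF.items, p.1 = k := by
      simpa [PySem.Dict.keys, List.mem_map] using hkeys
    have hk : ppsF.getD k PySem.Dict.empty = p.2 :=
      PySem.Dict.getD_of_mem_items ppsF (by rw [← hpk]; simpa using hp) hnd1 PySem.Dict.empty
    have hvv : v = p.2.values.sum := by rw [← hkv, hg, hk]
    rw [hvv]
    exact List.mem_map_of_mem hp
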